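-- pv_equiv track=rewrite | github.com/Lexaon/Lexaon | 23190606.py | max_min_employees
-- ===== SOURCE A (Python) =====
-- def max_min_employees(data, country):
--     # Find organizations with the highest and lowest number of employees for a specific country founded between 1981 and 2000.
--     max_employee_org = None
--     min_employee_org = None
--     max_employees = float('-inf')
--     min_employees = float('inf')
--
--     for record in data:
--         if record['Country'] == country and 1981 <= int(record['Founded']) <= 2000:
--             num_employees = int(record['Number of employees'])
--             if num_employees > max_employees:
--                 max_employees = num_employees
--                 max_employee_org = record['Name']
--             if num_employees < min_employees:
--                 min_employees = num_employees
--                 min_employee_org = record['Name']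
--
--     return [max_employee_org, min_employee_org]
-- ===== SOURCE B (Python) =====
-- def max_min_employees(data, country):
--     # Filter once, then take max/min with key= (first extremal, matching A's strict comparisons).
--     filtered = [(int(record['Number of employees']), record['Name'])
--                 for record in data
--                 if record['Country'] == country and 1981 <= int(record['Founded']) <= 2000]
--     if not filtered:
--         return [None, None]
--     return [max(filtered, key=lambda t: t[0])[1], min(filtered, key=lambda t: t[0])[1]]
-- ===== Notes on version B (the rewrite author's own statement) =====
-- stated objective: idiomatic
-- what changed: A's single interleaved pass maintaining four running accumulators is replaced by one filtering comprehension building (employees, name) pairs followed by max()/min() with key=, which preserve A's first-occurrence tie-breaking.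
import Mathlib
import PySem

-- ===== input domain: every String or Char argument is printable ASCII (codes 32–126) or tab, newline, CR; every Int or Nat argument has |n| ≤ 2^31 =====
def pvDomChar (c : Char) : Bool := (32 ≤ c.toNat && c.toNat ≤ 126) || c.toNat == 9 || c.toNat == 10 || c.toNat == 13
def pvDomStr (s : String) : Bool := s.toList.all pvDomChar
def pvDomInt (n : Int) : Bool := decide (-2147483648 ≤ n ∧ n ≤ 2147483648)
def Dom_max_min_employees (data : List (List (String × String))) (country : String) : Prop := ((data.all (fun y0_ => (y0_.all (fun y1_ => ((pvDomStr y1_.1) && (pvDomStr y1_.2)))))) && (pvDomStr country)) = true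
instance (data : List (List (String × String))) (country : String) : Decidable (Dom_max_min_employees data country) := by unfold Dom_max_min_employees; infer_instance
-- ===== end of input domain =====

-- B replaces A's interleaved running-max/min loop by a filtering pass plus max/min with key; same O(n) cost.
-- dict lookup (first match in the association list); none = KeyError
def pvGetK (r : List (String × String)) (k : String) : Option String :=
  (r.find? (fun p => p.1 == k)).map (·.2)

-- ===== PORT A =====
def max_min_employees (data : List (List (String × String))) (country : String) : List (Option String) :=
  -- state: ((max_employee_org, max_employees), (min_employee_org, min_employees)); none plays ±inf
  let st := data.foldl
    (fun (st : (Option String × Option Int) × (Option String × Option Int)) record =>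
      if pvGetK record "Country" = some country then
        match (pvGetK record "Founded").bind PySem.Int.ofStr? with
        | some founded =>
          if 1981 ≤ founded ∧ founded ≤ 2000 then
            let num := ((pvGetK record "Number of employees").bind PySem.Int.ofStr?).getD 0
            let mx := match st.1.2 with
              | none => (pvGetK record "Name", some num)
              | some v => if v < num then (pvGetK record "Name", some num) else st.1
            let mn := match st.2.2 with
              | none => (pvGetK record "Name", some num)
              | some v => if num < v then (pvGetK record "Name", some num) else st.2
            (mx, mn)
          else st
        | none => st
      else st)
    ((none, none), (none, none))
  [st.1.1, st.2.1]

-- ===== PORT B =====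
-- the comprehension's per-record test and tuple
def pvClassify (country : String) (record : List (String × String)) : Option (Int × Option String) :=
  if pvGetK record "Country" = some country then
    match (pvGetK record "Founded").bind PySem.Int.ofStr? with
    | some founded =>
      if 1981 ≤ founded ∧ founded ≤ 2000 then
        some (((pvGetK record "Number of employees").bind PySem.Int.ofStr?).getD 0, pvGetK record "Name")
      else none
    | none => none
  else none

def max_min_employees_alt (data : List (List (String × String))) (country : String) : List (Option String) :=
  let filtered := data.filterMap (pvClassify country)
  if filtered.isEmpty then [none, none]
  else
    match PySem.List.max? filtered (·.1), PySem.List.min? filtered (·.1) with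
    | some mx, some mn => [mx.2, mn.2]
    | _, _ => [none, none]

-- ===== PRECONDITION & SPEC =====
-- Pre_ admits the inputs where neither program raises: every record has a 'Country' key, every record
-- of the requested country has an int-parsable 'Founded', and every record passing the full filter has
-- an int-parsable 'Number of employees' and a 'Name' key. Beyond A's own crash domain this excludes only
-- matched records lacking 'Name' that never win a strict comparison (A returns there; B's comprehension
-- reads 'Name' of every matched record and raises KeyError).
def pvPreRec (country : String) (r : List (String × String)) : Bool :=
  match pvGetK r "Country" with
  | none => false
  | some c =>
    if c = country then
      match (pvGetK r "Founded").bind PySem.Int.ofStr? with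
      | none => false
      | some y =>
        if 1981 ≤ y ∧ y ≤ 2000 then
          ((pvGetK r "Number of employees").bind PySem.Int.ofStr?).isSome && (pvGetK r "Name").isSome
        else true
    else true

def Pre_max_min_employees (data : List (List (String × String))) (country : String) : Prop :=
  data.all (pvPreRec country) = true

instance (data : List (List (String × String))) (country : String) : Decidable (Pre_max_min_employees data country) := by
  unfold Pre_max_min_employees; infer_instance

def pvWitness_max_min_employees : (List (List (String × String))) × String :=
  ([[("Country", "X"), ("Founded", "1990"), ("Number of employees", "5"), ("Name", "a")],
    [("Country", "Y"), ("Founded", "1999"), ("Number of employees", "2"), ("Name", "b")]], "X")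

def Spec_max_min_employees (data : List (List (String × String))) (country : String) (out : List (Option String)) : Prop := out = max_min_employees_alt data country
instance (data : List (List (String × String))) (country : String) (out : List (Option String)) : Decidable (Spec_max_min_employees data country out) := by unfold Spec_max_min_employees; infer_instance

-- ===== CLAIM (what is proved, stated in full; the proofs are below) =====
def Claim_equal_max_min_employees : Prop := ∀ (data : List (List (String × String))) (country : String), Dom_max_min_employees data country → Pre_max_min_employees data country → Spec_max_min_employees data country (max_min_employees data country)

-- ===== LEMMAS AND PROOFS =====

-- A's loop body applied to one record, as a function of the classified pair
def pvUpd (st : (Option String × Option Int) × (Option String × Option Int)) (p : Int × Option String) :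
    (Option String × Option Int) × (Option String × Option Int) :=
  (match st.1.2 with
   | none => (p.2, some p.1)
   | some v => if v < p.1 then (p.2, some p.1) else st.1,
   match st.2.2 with
   | none => (p.2, some p.1)
   | some v => if p.1 < v then (p.2, some p.1) else st.2)

-- decoding of an Option-valued running extremum into A's (org, value) pair
def pvEnc (o : Option (Int × Option String)) : Option String × Option Int :=
  match o with
  | none => (none, none)
  | some p => (p.2, some p.1)

-- componentwise updates: A's loop is two independent accumulators
def pvUpdMax (a : Option String × Option Int) (p : Int × Option String) : Option String × Option Int :=
  match a.2 with
  | none => (p.2, some p.1)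
  | some v => if v < p.1 then (p.2, some p.1) else a

def pvUpdMin (a : Option String × Option Int) (p : Int × Option String) : Option String × Option Int :=
  match a.2 with
  | none => (p.2, some p.1)
  | some v => if p.1 < v then (p.2, some p.1) else a

theorem pvStep_eq (country : String) (r : List (String × String))
    (st : (Option String × Option Int) × (Option String × Option Int)) :
    (if pvGetK r "Country" = some country then
        match (pvGetK r "Founded").bind PySem.Int.ofStr? with
        | some founded =>
          if 1981 ≤ founded ∧ founded ≤ 2000 then
            let num := ((pvGetK r "Number of employees").bind PySem.Int.ofStr?).getD 0
            let mx := match st.1.2 with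
              | none => (pvGetK r "Name", some num)
              | some v => if v < num then (pvGetK r "Name", some num) else st.1
            let mn := match st.2.2 with
              | none => (pvGetK r "Name", some num)
              | some v => if num < v then (pvGetK r "Name", some num) else st.2
            (mx, mn)
          else st
        | none => st
      else st)
    = (match pvClassify country r with
       | some p => pvUpd st p
       | none => st) := by
  unfold pvClassify pvUpd
  by_cases hc : pvGetK r "Country" = some country
  · rw [if_pos hc, if_pos hc]
    cases hf : (pvGetK r "Founded").bind PySem.Int.ofStr? with
    | none => rfl
    | some y =>
      dsimp only
      by_cases hy : 1981 ≤ y ∧ y ≤ 2000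
      · rw [if_pos hy, if_pos hy]
      · rw [if_neg hy, if_neg hy]
  · rw [if_neg hc, if_neg hc]

def pvMStep (acc : Option (Int × Option String)) (x : Int × Option String) : Option (Int × Option String) :=
  match acc with
  | none => some x
  | some m => if m.1 < x.1 then some x else some m

def pvNStep (acc : Option (Int × Option String)) (x : Int × Option String) : Option (Int × Option String) :=
  match acc with
  | none => some x
  | some m => if x.1 < m.1 then some x else some m

theorem pvMax?_eq (ps : List (Int × Option String)) :
    PySem.List.max? ps (fun x => x.1) = ps.foldl pvMStep none := by
  simp only [PySem.List.max?]
  refine List.foldl_ext _ _ _ ?_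
  intro a x hx
  cases a <;> rfl

theorem pvMin?_eq (ps : List (Int × Option String)) :
    PySem.List.min? ps (fun x => x.1) = ps.foldl pvNStep none := by
  simp only [PySem.List.min?]
  refine List.foldl_ext _ _ _ ?_
  intro a x hx
  cases a <;> rfl

theorem pvUpdMax_enc (acc : Option (Int × Option String)) (x : Int × Option String) :
    pvUpdMax (pvEnc acc) x = pvEnc (pvMStep acc x) := by
  unfold pvMStep
  cases acc with
  | none => rfl
  | some m =>
    simp only [pvEnc, pvUpdMax]
    by_cases h : m.1 < x.1
    · simp [h]
    · simp [h]

theorem pvUpdMin_enc (acc : Option (Int × Option String)) (x : Int × Option String) :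
    pvUpdMin (pvEnc acc) x = pvEnc (pvNStep acc x) := by
  unfold pvNStep
  cases acc with
  | none => rfl
  | some m =>
    simp only [pvEnc, pvUpdMin]
    by_cases h : x.1 < m.1
    · simp [h]
    · simp [h]

theorem pvFoldMax_enc (ps : List (Int × Option String)) :
    ∀ acc, ps.foldl pvUpdMax (pvEnc acc) = pvEnc (ps.foldl pvMStep acc) := by
  induction ps with
  | nil => intro acc; rfl
  | cons p t ih => intro acc; simp only [List.foldl_cons, pvUpdMax_enc]; exact ih _

theorem pvFoldMin_enc (ps : List (Int × Option String)) :
    ∀ acc, ps.foldl pvUpdMin (pvEnc acc) = pvEnc (ps.foldl pvNStep acc) := by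
  induction ps with
  | nil => intro acc; rfl
  | cons p t ih => intro acc; simp only [List.foldl_cons, pvUpdMin_enc]; exact ih _

theorem pvA_closed (data : List (List (String × String))) (country : String) :
    max_min_employees data country
      = [(pvEnc (PySem.List.max? (data.filterMap (pvClassify country)) (·.1))).1,
         (pvEnc (PySem.List.min? (data.filterMap (pvClassify country)) (·.1))).1] := by
  unfold max_min_employees
  have hstep : data.foldl
      (fun (st : (Option String × Option Int) × (Option String × Option Int)) record =>
        if pvGetK record "Country" = some country then
          match (pvGetK record "Founded").bind PySem.Int.ofStr? with
          | some founded =>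
            if 1981 ≤ founded ∧ founded ≤ 2000 then
              let num := ((pvGetK record "Number of employees").bind PySem.Int.ofStr?).getD 0
              let mx := match st.1.2 with
                | none => (pvGetK record "Name", some num)
                | some v => if v < num then (pvGetK record "Name", some num) else st.1
              let mn := match st.2.2 with
                | none => (pvGetK record "Name", some num)
                | some v => if num < v then (pvGetK record "Name", some num) else st.2
              (mx, mn)
            else st
          | none => st
        else st)
      ((none, none), (none, none))
    = (data.filterMap (pvClassify country)).foldl pvUpd ((none, none), (none, none)) := by
    rw [List.foldl_filterMap]
    have hfe := funext (fun (st : (Option String × Option Int) × (Option String × Option Int)) =>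
      funext (fun (r : List (String × String)) => pvStep_eq country r st))
    rw [hfe]
    congr 1
    funext x y
    cases pvClassify country y <;> rfl
  rw [hstep]
  have hsplit : (data.filterMap (pvClassify country)).foldl pvUpd ((none, none), (none, none))
      = ((data.filterMap (pvClassify country)).foldl pvUpdMax (none, none),
         (data.filterMap (pvClassify country)).foldl pvUpdMin (none, none)) := by
    have hupd : pvUpd = fun (s : (Option String × Option Int) × (Option String × Option Int))
        (e : Int × Option String) => (pvUpdMax s.1 e, pvUpdMin s.2 e) := rfl
    rw [hupd, PySem.List.foldl_prod_mk (f := pvUpdMax) (g := pvUpdMin)]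
  rw [hsplit]
  have h1 := pvFoldMax_enc (data.filterMap (pvClassify country)) none
  have h2 := pvFoldMin_enc (data.filterMap (pvClassify country)) none
  simp only [pvEnc] at h1 h2
  rw [h1, h2, pvMax?_eq, pvMin?_eq]
  rfl

theorem max_min_employees_spec : Claim_equal_max_min_employees := by
  intro data country _ _
  unfold Spec_max_min_employees
  rw [pvA_closed]
  unfold max_min_employees_alt
  cases hps : data.filterMap (pvClassify country) with
  | nil =>
    unfold PySem.List.max? PySem.List.min?
    simp [pvEnc]
  | cons p t =>
    cases hm : PySem.List.max? (p :: t) (·.1) with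
    | none => exact absurd ((PySem.List.max?_eq_none_iff _ _).mp hm) (by simp)
    | some mx =>
      cases hn : PySem.List.min? (p :: t) (·.1) with
      | none => exact absurd ((PySem.List.min?_eq_none_iff _ _).mp hn) (by simp)
      | some mn => simp [pvEnc, hm, hn]
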